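-- pv_equiv track=rewrite | github.com/MrBrantCode/unitest_baseline | mut_generate/mist_train_cf/cf_3626/solution.py | find_second_highest
-- ===== SOURCE A (Python) =====
-- def find_second_highest(numbers):
--     if len(numbers) < 2:
--         return None
--
--     unique_numbers = sorted(set(numbers), reverse=True)
--     second_highest = unique_numbers[1] if len(unique_numbers) >= 2 else unique_numbers[0]
--
--     if numbers.count(second_highest) > 1:
--         return find_second_highest([num for num in numbers if num != second_highest])
--     else:
--         return second_highest
-- ===== SOURCE B (Python) =====
-- def find_second_highest(numbers):
--     counts = {}
--     for n in numbers:
--         counts[n] = counts.get(n, 0) + 1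
--     for v in sorted(counts, reverse=True)[1:]:
--         if counts[v] == 1:
--             return v
--     return None
-- ===== Notes on version B (the rewrite author's own statement) =====
-- stated objective: alternative
-- what changed: Replaced A's recursion that re-sorts and re-filters the whole list on every duplicate hit with a single counting pass, one descending sort of the distinct values, and one scan from the second value for the first count-1 value.
import Mathlib
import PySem

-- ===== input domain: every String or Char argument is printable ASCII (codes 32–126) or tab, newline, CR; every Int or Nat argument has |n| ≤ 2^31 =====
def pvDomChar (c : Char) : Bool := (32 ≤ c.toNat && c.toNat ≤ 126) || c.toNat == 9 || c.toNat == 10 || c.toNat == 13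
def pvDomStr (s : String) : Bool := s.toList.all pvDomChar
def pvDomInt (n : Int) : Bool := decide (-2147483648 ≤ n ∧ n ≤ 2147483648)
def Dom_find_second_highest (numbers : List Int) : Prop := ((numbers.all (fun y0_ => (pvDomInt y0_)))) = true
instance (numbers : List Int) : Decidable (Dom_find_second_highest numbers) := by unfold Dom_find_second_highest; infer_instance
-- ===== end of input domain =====

-- B replaces A's recursive re-sort-and-filter with one counting pass, one descending
-- sort of the distinct values, and one scan from the second value (objective: alternative).

-- ===== PORT A =====
def find_second_highest (numbers : List Int) : Option Int :=
  if numbers.length < 2 then none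
  else
    let unique_numbers := PySem.List.sorted (PySem.Set.ofList numbers) (fun x => x) true
    let second_highest :=
      if 2 ≤ unique_numbers.length then PySem.List.pyGetD unique_numbers 1 0
      else PySem.List.pyGetD unique_numbers 0 0  -- indices in range: unique_numbers ≠ []
    if 1 < PySem.List.count numbers second_highest then
      find_second_highest (numbers.filter (fun num => num ≠ second_highest))
    else some second_highest
termination_by numbers.length
decreasing_by
  have hmem : second_highest ∈ numbers := by
    have : 0 < PySem.List.count numbers second_highest := by omega
    simpa [PySem.List.count_eq, List.count_pos_iff] using this
  simp only [List.length_unattach, ← List.countP_eq_length_filter]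
  rw [List.countP_attach (p := fun y => decide (y ≠ second_highest))]
  exact List.countP_lt_length_iff.mpr ⟨second_highest, hmem, by simp⟩

-- ===== PORT B =====
def find_second_highest_alt (numbers : List Int) : Option Int :=
  let counts := numbers.foldl (fun d n => d.insert n (d.getD n 0 + 1)) (PySem.Dict.empty : PySem.Dict Int Int)
  -- desc[1:] is List.drop 1 (Python slice [1:] on any list)
  ((PySem.List.sorted counts.keys (fun x => x) true).drop 1).find?
    (fun v => counts.getD v 0 == 1)

-- ===== PRECONDITION & SPEC =====
def Spec_find_second_highest (numbers : List Int) (out : Option Int) : Prop := out = find_second_highest_alt numbers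
instance (numbers : List Int) (out : Option Int) : Decidable (Spec_find_second_highest numbers out) := by unfold Spec_find_second_highest; infer_instance

-- ===== CLAIM (what is proved, stated in full; the proofs are below) =====
def Claim_equal_find_second_highest : Prop := ∀ (numbers : List Int), Dom_find_second_highest numbers → Spec_find_second_highest numbers (find_second_highest numbers)

-- ===== LEMMAS AND PROOFS =====

def pvS (xs : List Int) : List Int := PySem.List.sorted (PySem.Set.ofList xs) (fun x => x) true

theorem pvS_pairwise (xs : List Int) : (pvS xs).Pairwise (· > ·) := by
  have h1 := PySem.List.sorted_pairwise_rev (xs := PySem.Set.ofList xs) (key := fun x => x)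
  have h2 : (pvS xs).Nodup :=
    (PySem.List.sorted_perm (xs := PySem.Set.ofList xs) (key := fun x => x) (rev := true)).nodup_iff.mpr
      (PySem.Set.nodup_ofList xs)
  exact (h1.and h2).imp (fun {a b} h => lt_of_le_of_ne h.1 (Ne.symm h.2))

theorem pvS_mem (xs : List Int) (v : Int) : v ∈ pvS xs ↔ v ∈ xs := by
  rw [pvS, PySem.List.mem_sorted, PySem.Set.mem_ofList]

theorem pvS_filter (xs : List Int) (s : Int) :
    pvS (xs.filter (fun num => decide (num ≠ s))) = (pvS xs).filter (fun num => decide (num ≠ s)) := by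
  apply PySem.List.sorted_rev_eq_of_perm_of_pairwise_gt
  · apply List.Perm.symm
    have hnd : (pvS xs).Nodup := (PySem.List.sorted_perm _ _ _).nodup_iff.mpr (PySem.Set.nodup_ofList xs)
    rw [List.perm_ext_iff_of_nodup (PySem.Set.nodup_ofList _) (List.Sublist.nodup List.filter_sublist hnd)]
    intro a
    simp [PySem.Set.mem_ofList, List.mem_filter, pvS_mem]
  · exact List.Pairwise.sublist List.filter_sublist (pvS_pairwise xs)

theorem pv_find_congr {α : Type} (l : List α) (f g : α → Bool) (h : ∀ x ∈ l, f x = g x) :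
    l.find? f = l.find? g := by
  induction l with
  | nil => rfl
  | cons a t ih =>
    simp only [List.find?_cons]
    rw [h a (by simp)]
    cases g a
    · exact ih (fun x hx => h x (by simp [hx]))
    · rfl

theorem alt_eq (xs : List Int) :
    find_second_highest_alt xs = ((pvS xs).drop 1).find? (fun v => (xs.count v : Int) == 1) := by
  rw [find_second_highest_alt]
  have hk : (xs.foldl (fun d n => d.insert n (d.getD n 0 + 1)) (PySem.Dict.empty : PySem.Dict Int Int)).keys = PySem.Set.ofList xs := by
    rw [PySem.Dict.keys_foldl_insert]
    rfl
  have hg : ∀ v, (xs.foldl (fun d n => d.insert n (d.getD n 0 + 1)) (PySem.Dict.empty : PySem.Dict Int Int)).getD v 0 = (xs.count v : Int) := by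
    intro v
    rw [PySem.Dict.getD_foldl_insert_add_one]
    simp
  simp only [hk, pvS]
  apply pv_find_congr
  intro v _
  exact congrArg (fun z => z == 1) (hg v)


theorem pyGetD_cons_one (a b : Int) (t : List Int) (d : Int) : PySem.List.pyGetD (a :: b :: t) 1 d = b := by
  simp [pysem]

theorem pv_main (n : Nat) : ∀ (xs : List Int), xs.length ≤ n →
    find_second_highest xs = ((pvS xs).drop 1).find? (fun v => (xs.count v : Int) == 1) := by
  induction n with
  | zero =>
    intro xs h
    have hnil : xs = [] := List.eq_nil_of_length_eq_zero (Nat.le_zero.mp h)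
    subst hnil
    rw [find_second_highest]
    simp [show pvS [] = ([] : List Int) from rfl]
  | succ m ih =>
    intro xs hlen
    rw [find_second_highest]
    by_cases h2 : xs.length < 2
    · rw [if_pos h2]
      match xs, h2 with
      | [], _ => simp [show pvS [] = ([] : List Int) from rfl]
      | [x], _ =>
        rw [show pvS [x] = [x] from rfl]
        simp
    · rw [if_neg h2]
      have hxne : xs ≠ [] := by intro h; subst h; simp at h2
      cases hS : pvS xs with
      | nil =>
        exfalso
        obtain ⟨x, hx⟩ := List.exists_mem_of_ne_nil xs hxne
        have := (pvS_mem xs x).mpr hx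
        rw [hS] at this
        exact List.not_mem_nil this
      | cons a T =>
        have hpair := pvS_pairwise xs
        rw [hS] at hpair
        cases T with
        | nil =>
          -- all elements of xs equal a
          have hall : ∀ x ∈ xs, x = a := by
            intro x hx
            have := (pvS_mem xs x).mpr hx
            rw [hS] at this
            simpa using this
          have hcnt : xs.count a = xs.length := by
            rw [List.count_eq_length]
            intro x hx; simp [hall x hx]
          have hsec : (if 2 ≤ (pvS xs).length then PySem.List.pyGetD (pvS xs) 1 0
              else PySem.List.pyGetD (pvS xs) 0 0) = a := by
            rw [hS]; simp
          rw [show PySem.List.sorted (PySem.Set.ofList xs) (fun x => x) true = pvS xs from rfl]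
          simp only [hsec]
          have hgt : 1 < PySem.List.count xs a := by
            rw [PySem.List.count_eq, hcnt]; omega
          rw [if_pos hgt]
          have hfe : xs.filter (fun num => decide (num ≠ a)) = [] := by
            rw [List.filter_eq_nil_iff]
            intro x hx; simp [hall x hx]
          rw [hfe]
          rw [show find_second_highest [] = none from by rw [find_second_highest]; simp]
          simp
        | cons s t =>
          -- pvS xs = a :: s :: t
          have hsec : (if 2 ≤ (pvS xs).length then PySem.List.pyGetD (pvS xs) 1 0
              else PySem.List.pyGetD (pvS xs) 0 0) = s := by
            rw [hS]
            rw [if_pos (by simp)]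
            exact pyGetD_cons_one a s t 0
          rw [show PySem.List.sorted (PySem.Set.ofList xs) (fun x => x) true = pvS xs from rfl]
          simp only [hsec]
          have hsmem : s ∈ xs := by
            rw [← pvS_mem, hS]; simp
          have hcpos : 0 < xs.count s := List.count_pos_iff.mpr hsmem
          have hts : ∀ x ∈ t, x ≠ s := by
            intro x hx
            have : s > x := (List.pairwise_cons.mp (List.pairwise_cons.mp hpair).2).1 x hx
            omega
          by_cases hc : 1 < xs.count s
          · rw [if_pos (by rw [PySem.List.count_eq]; exact hc)]
            have hlt : (xs.filter (fun num => decide (num ≠ s))).length < xs.length := by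
              rw [← List.countP_eq_length_filter]
              exact List.countP_lt_length_iff.mpr ⟨s, hsmem, by simp⟩
            have hrec := ih (xs.filter (fun num => decide (num ≠ s))) (by omega)
            rw [hrec]
            have hfil : pvS (xs.filter (fun num => decide (num ≠ s))) = a :: t := by
              rw [pvS_filter, hS]
              have ha : a ≠ s := by
                have : a > s := (List.pairwise_cons.mp hpair).1 s (by simp)
                omega
              simp only [List.filter_cons]
              rw [if_pos (by simp [ha]), if_neg (by simp)]
              rw [List.filter_eq_self.mpr (by intro x hx; simp [hts x hx])]
            rw [hfil]
            simp only [List.drop_one, List.tail_cons]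
            rw [pv_find_congr t _ (fun v => ((xs.count v : Int) == 1))]
            · rw [List.find?_cons_of_neg]
              simp only [beq_iff_eq]
              intro hcon
              have : xs.count s = 1 := by exact_mod_cast hcon
              omega
            · intro x hx
              have : (xs.filter (fun num => decide (num ≠ s))).count x = xs.count x :=
                List.count_filter (by simp [hts x hx])
              rw [this]
          · rw [if_neg (by rw [PySem.List.count_eq]; exact hc)]
            have hone : xs.count s = 1 := by omega
            simp only [List.drop_one, List.tail_cons]
            rw [List.find?_cons_of_pos]
            simp [hone]

-- ===== VERDICT (by name: the statement is the Claim_ definition above) =====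
theorem find_second_highest_spec : Claim_equal_find_second_highest := by
  intro xs _
  unfold Spec_find_second_highest
  rw [alt_eq]
  exact pv_main xs.length xs le_rfl
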